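-- pv_equiv track=rewrite | github.com/MichalFedorek420/II-rok-python | mocks2/p2.py | f
-- ===== SOURCE A (Python) =====
-- def f(x):
--     counter = 0
--     for i in x:
--         if i == "+":
--             counter +=1
--         if i == "-":
--             counter -=1
--     return counter
-- ===== SOURCE B (Python) =====
-- def f(x):
--     s = sorted(x)
--
--     def lower(t):  # first index whose element is >= t (binary search)
--         lo, hi = 0, len(s)
--         while lo < hi:
--             mid = (lo + hi) // 2
--             if s[mid] < t:
--                 lo = mid + 1
--             else:
--                 hi = mid
--         return lo
--
--     def upper(t):  # first index whose element is > t (binary search)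
--         lo, hi = 0, len(s)
--         while lo < hi:
--             mid = (lo + hi) // 2
--             if t < s[mid]:
--                 hi = mid
--             else:
--                 lo = mid + 1
--         return lo
--
--     return (upper("+") - lower("+")) - (upper("-") - lower("-"))
-- ===== Notes on version B (the rewrite author's own statement) =====
-- stated objective: alternative
-- what changed: Replaces the branch-per-element running accumulator with sort-then-binary-search: sort the list once, locate the '+' and '-' runs with hand-written lower/upper binary searches, and return the difference of the two run lengths.
import Mathlib
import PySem

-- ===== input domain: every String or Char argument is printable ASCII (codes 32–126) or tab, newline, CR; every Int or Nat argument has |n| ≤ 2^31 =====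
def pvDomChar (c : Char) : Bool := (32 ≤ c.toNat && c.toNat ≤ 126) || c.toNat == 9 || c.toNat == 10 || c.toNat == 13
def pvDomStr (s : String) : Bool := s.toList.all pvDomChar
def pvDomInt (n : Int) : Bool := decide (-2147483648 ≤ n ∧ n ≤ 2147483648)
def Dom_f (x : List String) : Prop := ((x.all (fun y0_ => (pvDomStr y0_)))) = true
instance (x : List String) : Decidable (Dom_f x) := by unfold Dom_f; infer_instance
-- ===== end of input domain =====

-- B replaces A's running signed accumulator with sort-then-binary-search: sort once,
-- find the '+' and '-' runs by binary search, return the difference of their lengths (alternative).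

-- ===== PORT A =====
def f (x : List String) : Int :=
  x.foldl (fun counter i =>
    let counter := if i = "+" then counter + 1 else counter
    if i = "-" then counter - 1 else counter) 0

-- ===== PORT B =====
-- B-side helper: Python's `while lo < hi` lower-bound binary search; s[mid] is always
-- in range here (0 ≤ lo ≤ mid < hi ≤ len s), so getD is exact; (lo+hi)//2 = Nat `/` on naturals.
def lowerB (s : List String) (t : String) (lo hi : Nat) : Nat :=
  if _h : lo < hi then
    let mid := (lo + hi) / 2
    if s.getD mid "" < t then lowerB s t (mid + 1) hi else lowerB s t lo mid
  else lo
termination_by hi - lo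
decreasing_by all_goals omega

-- B-side helper: Python's upper-bound binary search (first index with t < s[i]).
def upperB (s : List String) (t : String) (lo hi : Nat) : Nat :=
  if _h : lo < hi then
    let mid := (lo + hi) / 2
    if t < s.getD mid "" then upperB s t lo mid else upperB s t (mid + 1) hi
  else lo
termination_by hi - lo
decreasing_by all_goals omega

def f_alt (x : List String) : Int :=
  let s := PySem.List.sorted x (fun a => a) false
  ((upperB s "+" 0 s.length : Int) - (lowerB s "+" 0 s.length : Int))
    - ((upperB s "-" 0 s.length : Int) - (lowerB s "-" 0 s.length : Int))

-- ===== PRECONDITION & SPEC =====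
def Spec_f (x : List String) (out : Int) : Prop := out = f_alt x
instance (x : List String) (out : Int) : Decidable (Spec_f x out) := by unfold Spec_f; infer_instance

-- ===== CLAIM (what is proved, stated in full; the proofs are below) =====
def Claim_equal_f : Prop := ∀ (x : List String), Dom_f x → Spec_f x (f x)

-- ===== LEMMAS AND PROOFS =====

-- A's loop computes count of "+" minus count of "-".
theorem f_eq_counts (x : List String) :
    f x = (x.count "+" : Int) - (x.count "-" : Int) := by
  unfold f
  induction x using List.reverseRecOn with
  | nil => simp
  | append_singleton xs a ih =>
    simp only [List.foldl_append, List.foldl_cons, List.foldl_nil, ih,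
      List.count_append, List.count_singleton]
    by_cases h1 : a = "+" <;> by_cases h2 : a = "-" <;>
      simp [h1, h2, beq_iff_eq] <;> ring

-- In a sorted list, a downward-closed predicate holds exactly on the prefix of length countP.
theorem sorted_prefix (s : List String) (p : String → Bool)
    (hp : ∀ a b : String, a ≤ b → p b = true → p a = true)
    (hs : s.Pairwise (· ≤ ·)) :
    ∀ i (h : i < s.length), (p s[i] = true ↔ i < s.countP p) := by
  induction s with
  | nil => intro i h; simp at h
  | cons a l ih =>
    rcases List.pairwise_cons.mp hs with ⟨ha, hl⟩
    intro i h
    by_cases hpa : p a = true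
    · rcases i with _ | j
      · simp [hpa]
      · have hj : j < l.length := by simp only [List.length_cons] at h; omega
        simp only [List.getElem_cons_succ, List.countP_cons, if_pos hpa]
        rw [ih hl j hj]
        omega
    · have hz : l.countP p = 0 := by
        apply List.countP_eq_zero.mpr
        intro b hb hpb
        exact hpa (hp a b (ha b hb) hpb)
      rcases i with _ | j
      · simp [hpa, hz]
      · have hj : j < l.length := by simp only [List.length_cons] at h; omega
        have hmem : l[j] ∈ l := List.getElem_mem _
        simp only [List.getElem_cons_succ, List.countP_cons, if_neg hpa, hz]
        constructor
        · intro hpb; exact absurd (hp a _ (ha _ hmem) hpb) hpa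
        · omega

-- The lower binary search returns the splitting point k of (· < t): strong induction on hi - lo.
theorem lowerB_eq (s : List String) (t : String) (k : Nat)
    (hk : ∀ i (h : i < s.length), (decide (s[i] < t) = true ↔ i < k)) :
    ∀ n lo hi, hi - lo = n → lo ≤ k → k ≤ hi → hi ≤ s.length → lowerB s t lo hi = k := by
  intro n
  induction n using Nat.strong_induction_on with
  | _ n ih =>
    intro lo hi hn h1 h2 h3
    rw [lowerB]
    by_cases h : lo < hi
    · simp only [dif_pos h]
      split_ifs with hc
      · have hmid : (lo + hi) / 2 < s.length := by omega
        have hg : s.getD ((lo + hi) / 2) "" = s[(lo + hi) / 2] := List.getD_eq_getElem s "" hmid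
        have hlt : (lo + hi) / 2 < k := (hk _ hmid).mp (by rw [← hg]; exact decide_eq_true hc)
        exact ih (hi - ((lo + hi) / 2 + 1)) (by omega) _ _ rfl (by omega) h2 h3
      · have hmid : (lo + hi) / 2 < s.length := by omega
        have hg : s.getD ((lo + hi) / 2) "" = s[(lo + hi) / 2] := List.getD_eq_getElem s "" hmid
        have hge : ¬ (lo + hi) / 2 < k := by
          intro hlt
          exact hc (by rw [hg]; exact of_decide_eq_true ((hk _ hmid).mpr hlt))
        exact ih ((lo + hi) / 2 - lo) (by omega) _ _ rfl h1 (by omega) (by omega)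
    · simp only [dif_neg h]
      omega

-- The upper binary search returns the splitting point k of (· ≤ t).
theorem upperB_eq (s : List String) (t : String) (k : Nat)
    (hk : ∀ i (h : i < s.length), (decide (s[i] ≤ t) = true ↔ i < k)) :
    ∀ n lo hi, hi - lo = n → lo ≤ k → k ≤ hi → hi ≤ s.length → upperB s t lo hi = k := by
  intro n
  induction n using Nat.strong_induction_on with
  | _ n ih =>
    intro lo hi hn h1 h2 h3
    rw [upperB]
    by_cases h : lo < hi
    · simp only [dif_pos h]
      split_ifs with hc
      · have hmid : (lo + hi) / 2 < s.length := by omega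
        have hg : s.getD ((lo + hi) / 2) "" = s[(lo + hi) / 2] := List.getD_eq_getElem s "" hmid
        have hge : ¬ (lo + hi) / 2 < k := by
          intro hlt
          have := of_decide_eq_true ((hk _ hmid).mpr hlt)
          rw [← hg] at this
          exact absurd hc (not_lt.mpr this)
        exact ih ((lo + hi) / 2 - lo) (by omega) _ _ rfl h1 (by omega) (by omega)
      · have hmid : (lo + hi) / 2 < s.length := by omega
        have hg : s.getD ((lo + hi) / 2) "" = s[(lo + hi) / 2] := List.getD_eq_getElem s "" hmid
        have hle : s[(lo + hi) / 2] ≤ t := by rw [← hg]; exact not_lt.mp hc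
        have hlt : (lo + hi) / 2 < k := (hk _ hmid).mp (decide_eq_true hle)
        exact ih (hi - ((lo + hi) / 2 + 1)) (by omega) _ _ rfl (by omega) h2 h3
    · simp only [dif_neg h]
      omega

-- countP (≤ t) = countP (< t) + count t.
theorem countP_le_split (s : List String) (t : String) :
    s.countP (fun a => decide (a ≤ t)) = s.countP (fun a => decide (a < t)) + s.count t := by
  induction s with
  | nil => simp
  | cons a l ih =>
    rw [List.countP_cons, List.countP_cons, List.count_cons, ih]
    rcases lt_trichotomy a t with h | h | h
    · rw [if_pos (decide_eq_true (le_of_lt h)), if_pos (decide_eq_true h),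
        if_neg (by simp [ne_of_lt h])]
      omega
    · subst h
      rw [if_pos (decide_eq_true le_rfl), if_neg (by simp), if_pos (by simp)]
      omega
    · rw [if_neg (by simp [not_le_of_gt h]), if_neg (by simp [not_lt_of_gt h]),
        if_neg (by simp [(ne_of_lt h).symm])]
      omega

theorem f_alt_eq_counts (x : List String) :
    f_alt x = (x.count "+" : Int) - (x.count "-" : Int) := by
  have hs : (PySem.List.sorted x (fun a => a) false).Pairwise (· ≤ ·) := by
    simpa using PySem.List.sorted_pairwise x (fun a => a)
  have hperm : (PySem.List.sorted x (fun a => a) false).Perm x :=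
    PySem.List.sorted_perm x (fun a => a) false
  have key : ∀ t : String,
      (upperB (PySem.List.sorted x (fun a => a) false) t 0
          (PySem.List.sorted x (fun a => a) false).length : Int)
        - (lowerB (PySem.List.sorted x (fun a => a) false) t 0
            (PySem.List.sorted x (fun a => a) false).length : Int)
        = (x.count t : Int) := by
    intro t
    set s := PySem.List.sorted x (fun a => a) false with hsdef
    have hlow := lowerB_eq s t (s.countP (fun a => decide (a < t)))
      (fun i h => by
        simpa using sorted_prefix s (fun a => decide (a < t))
          (fun a b hab hb => decide_eq_true (lt_of_le_of_lt hab (of_decide_eq_true hb))) hs i h)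
      (s.length - 0) 0 s.length rfl (Nat.zero_le _) List.countP_le_length le_rfl
    have hup := upperB_eq s t (s.countP (fun a => decide (a ≤ t)))
      (fun i h => by
        simpa using sorted_prefix s (fun a => decide (a ≤ t))
          (fun a b hab hb => decide_eq_true (le_trans hab (of_decide_eq_true hb))) hs i h)
      (s.length - 0) 0 s.length rfl (Nat.zero_le _) List.countP_le_length le_rfl
    rw [hlow, hup, countP_le_split, hperm.count_eq]
    push_cast
    ring
  simp only [f_alt]
  rw [key "+", key "-"]

-- ===== VERDICT (by name: the statement is the Claim_ definition above) =====
theorem f_spec : Claim_equal_f := by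
  intro x _
  unfold Spec_f
  rw [f_eq_counts, f_alt_eq_counts]
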